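-- pv_equiv track=rewrite | github.com/Leapense/problems | 23414번: Removing Pairs/gen.py | possible_by_bruteforce
-- ===== SOURCE A (Python) =====
-- def possible_by_bruteforce(s: str, t: str) -> bool:
--     n = len(t)
--     m = len(s)
--
--     dp = [[False] * (m + 1) for _ in range(n + 1)]
--
--     for i in range(n + 1):
--         dp[i][m] = ((n - i) % 2 == 0)
--
--     for i in range(n - 1, -1, -1):
--         for j in range(m - 1, -1, -1):
--             match = t[i] == s[j] and dp[i + 1][j + 1]
--             delete_pair = (i + 2 <= n) and dp[i + 2][j]
--             dp[i][j] = match or delete_pair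
--
--     return dp[0][0]
-- ===== SOURCE B (Python) =====
-- def possible_by_bruteforce(s: str, t: str) -> bool:
--     n, m = len(t), len(s)
--     i = j = 0
--     while i < n and j < m:
--         if t[i] == s[j]:
--             i += 1
--             j += 1
--         else:
--             i += 2
--     return j == m and (n - i) % 2 == 0
-- ===== Notes on version B (the rewrite author's own statement) =====
-- stated objective: faster
-- what changed: Replaced the O(n*m) bottom-up DP table over (suffix of t, suffix of s) by a single-pass greedy two-pointer scan: match s[j] at the earliest t-position of the right parity, else skip two chars of t; an exchange argument (proved in Lean) shows the greedy is exact.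
import Mathlib
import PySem

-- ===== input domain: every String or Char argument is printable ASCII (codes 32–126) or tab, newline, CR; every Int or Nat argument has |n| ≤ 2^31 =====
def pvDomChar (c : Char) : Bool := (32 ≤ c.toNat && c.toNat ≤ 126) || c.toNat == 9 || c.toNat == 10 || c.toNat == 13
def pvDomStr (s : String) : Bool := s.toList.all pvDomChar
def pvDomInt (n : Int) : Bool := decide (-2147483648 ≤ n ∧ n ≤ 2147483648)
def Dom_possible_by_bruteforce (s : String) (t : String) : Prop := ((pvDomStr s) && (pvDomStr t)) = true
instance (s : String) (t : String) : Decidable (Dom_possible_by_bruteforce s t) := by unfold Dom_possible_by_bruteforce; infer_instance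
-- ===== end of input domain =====

-- B replaces A's O(n*m) suffix DP table by a one-pass greedy two-pointer scan (earliest
-- parity-compatible match, else skip two chars of t); objective: faster (asymptotic).


-- ===== PORT A =====
-- dp[a][b] read, with Python's in-range semantics (all reads in A are in range)
def pvRead (dp : List (List Bool)) (a b : Nat) : Bool := (dp.getD a []).getD b false

-- first loop: 'for i in range(I): dp[i][m] = ((n - i) % 2 == 0)'  (called with I = n+1)
def pvInitAux (tl sl : List Char) (I : Nat) (dp : List (List Bool)) : List (List Bool) :=
  (List.range I).foldl
    (fun dp i => dp.set i ((dp.getD i []).set sl.length (decide ((tl.length - i) % 2 = 0)))) dp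

-- inner loop: 'for j in range(J-1, -1, -1): …'  (called with J = m; values m-1..0)
def pvInnerAux (tl sl : List Char) (i J : Nat) (dp : List (List Bool)) : List (List Bool) :=
  (List.range J).reverse.foldl
    (fun dp j =>
      dp.set i ((dp.getD i []).set j
        (((tl[i]? == sl[j]?) && pvRead dp (i+1) (j+1)) ||
         (decide (i+2 ≤ tl.length) && pvRead dp (i+2) j)))) dp

-- outer loop: 'for i in range(I-1, -1, -1): <inner loop>'  (called with I = n; values n-1..0)
def pvOuterAux (tl sl : List Char) (I : Nat) (dp : List (List Bool)) : List (List Bool) :=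
  (List.range I).reverse.foldl (fun dp i => pvInnerAux tl sl i sl.length dp) dp

def possible_by_bruteforce (s : String) (t : String) : Bool :=
  let tl := t.toList
  let sl := s.toList
  let dp0 : List (List Bool) :=
    (List.range (tl.length + 1)).map (fun _ => List.replicate (sl.length + 1) false)
  let dp1 := pvInitAux tl sl (tl.length + 1) dp0
  let dp2 := pvOuterAux tl sl tl.length dp1
  pvRead dp2 0 0

-- ===== PORT B =====
-- the while loop of Source B, fused with its final 'return j == m and (n - i) % 2 == 0'
def pvGreedyLoop (sl tl : List Char) (i j : Nat) : Bool :=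
  if i < tl.length ∧ j < sl.length then
    if tl[i]? == sl[j]? then pvGreedyLoop sl tl (i+1) (j+1)
    else pvGreedyLoop sl tl (i+2) j
  else decide (j = sl.length) && decide ((tl.length - i) % 2 = 0)
termination_by tl.length - i
decreasing_by all_goals omega

def possible_by_bruteforce_alt (s : String) (t : String) : Bool :=
  pvGreedyLoop s.toList t.toList 0 0

-- ===== PRECONDITION & SPEC =====
def Spec_possible_by_bruteforce (s : String) (t : String) (out : Bool) : Prop := out = possible_by_bruteforce_alt s t
instance (s : String) (t : String) (out : Bool) : Decidable (Spec_possible_by_bruteforce s t out) := by unfold Spec_possible_by_bruteforce; infer_instance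

-- ===== CLAIM (what is proved, stated in full; the proofs are below) =====
def Claim_equal_possible_by_bruteforce : Prop := ∀ (s : String) (t : String), Dom_possible_by_bruteforce s t → Spec_possible_by_bruteforce s t (possible_by_bruteforce s t)

-- ===== LEMMAS AND PROOFS =====

-- the recurrence A's table computes, as a recursive function (proof-side device)
def pvDpFun (sl tl : List Char) (i j : Nat) : Bool :=
  if j = sl.length then decide ((tl.length - i) % 2 = 0)
  else if _h : i < tl.length then
    ((tl[i]? == sl[j]?) && pvDpFun sl tl (i+1) (j+1)) ||
    (decide (i+2 ≤ tl.length) && pvDpFun sl tl (i+2) j)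
  else false
termination_by tl.length - i
decreasing_by all_goals omega

lemma pvGetD_set (l : List Bool) (i j : Nat) (a : Bool) :
    (l.set i a).getD j false = if i = j ∧ i < l.length then a else l.getD j false := by
  simp [List.getD_eq_getElem?_getD, List.getElem?_set]
  split_ifs <;> simp_all <;> omega

lemma pvGetDL_set (dp : List (List Bool)) (i : Nat) (r : List Bool) (a : Nat) :
    (dp.set i r).getD a [] = if a = i ∧ i < dp.length then r else dp.getD a [] := by
  rw [List.getD_eq_getElem?_getD, List.getD_eq_getElem?_getD, List.getElem?_set]
  by_cases h1 : i = a
  · subst h1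
    by_cases h2 : i < dp.length
    · rw [if_pos rfl, if_pos h2, if_pos ⟨rfl, h2⟩]
      rfl
    · rw [if_pos rfl, if_neg h2, if_neg (fun h => h2 h.2), List.getElem?_eq_none (by omega)]
  · rw [if_neg h1, if_neg (fun h => h1 h.1.symm)]

-- reading after writing one cell dp[i][j] := v
lemma pvRead_setrow (dp : List (List Bool)) (i j : Nat) (v : Bool) (a b : Nat)
    (hi : i < dp.length) (hj : j < (dp.getD i []).length) :
    pvRead (dp.set i ((dp.getD i []).set j v)) a b =
      if a = i ∧ b = j then v else pvRead dp a b := by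
  unfold pvRead
  rw [pvGetDL_set]
  by_cases hai : a = i
  · subst hai
    rw [if_pos ⟨rfl, hi⟩, pvGetD_set]
    by_cases hbj : b = j
    · rw [if_pos ⟨hbj.symm, hj⟩, if_pos ⟨rfl, hbj⟩]
    · rw [if_neg (fun h => hbj h.1.symm), if_neg (fun h => hbj h.2)]
  · rw [if_neg (by simp [hai]), if_neg (by simp [hai])]

-- table well-formedness: n+1 rows of length m+1
def pvGood (n m : Nat) (dp : List (List Bool)) : Prop :=
  dp.length = n + 1 ∧ ∀ a, a ≤ n → (dp.getD a []).length = m + 1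

lemma pvGood_setrow (n m : Nat) (dp : List (List Bool)) (i j : Nat) (v : Bool)
    (hg : pvGood n m dp) : pvGood n m (dp.set i ((dp.getD i []).set j v)) := by
  obtain ⟨h1, h2⟩ := hg
  refine ⟨by simp [h1], ?_⟩
  intro a ha
  rw [pvGetDL_set]
  split_ifs with h
  · rw [List.length_set, h1] at *
    obtain ⟨rfl, hlt⟩ := h
    exact h2 a ha
  · exact h2 a ha

-- ---- characterisation of the initialisation phase ----

lemma pvInitAux_spec (tl sl : List Char) (I : Nat) (dp : List (List Bool))
    (hg : pvGood tl.length sl.length dp) (hI : I ≤ tl.length + 1) :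
    pvGood tl.length sl.length (pvInitAux tl sl I dp) ∧
    ∀ a b, pvRead (pvInitAux tl sl I dp) a b =
      if a < I ∧ b = sl.length then decide ((tl.length - a) % 2 = 0) else pvRead dp a b := by
  induction I with
  | zero =>
    refine ⟨by simpa [pvInitAux] using hg, ?_⟩
    intro a b; simp [pvInitAux]
  | succ I ih =>
    obtain ⟨ihg, ihr⟩ := ih (by omega)
    have hstep : pvInitAux tl sl (I+1) dp =
        (pvInitAux tl sl I dp).set I
          (((pvInitAux tl sl I dp).getD I []).set sl.length
            (decide ((tl.length - I) % 2 = 0))) := by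
      unfold pvInitAux
      rw [List.range_succ, List.foldl_concat]
    have hIlt : I < (pvInitAux tl sl I dp).length := by
      rw [ihg.1]; omega
    have hjlt : sl.length < ((pvInitAux tl sl I dp).getD I []).length := by
      rw [ihg.2 I (by omega)]; omega
    refine ⟨by rw [hstep]; exact pvGood_setrow _ _ _ _ _ _ ihg, ?_⟩
    intro a b
    rw [hstep, pvRead_setrow _ _ _ _ _ _ hIlt hjlt, ihr]
    split_ifs <;> simp_all <;> omega

-- ---- the inner loop fills row i with pvDpFun, leaving other rows alone ----

lemma pvInnerAux_spec (tl sl : List Char) (i : Nat) (hi : i < tl.length) :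
    ∀ (J : Nat) (dp : List (List Bool)), J ≤ sl.length →
    pvGood tl.length sl.length dp →
    (∀ a b, i < a → a ≤ tl.length → b ≤ sl.length → pvRead dp a b = pvDpFun sl tl a b) →
    pvRead dp i sl.length = pvDpFun sl tl i sl.length →
    pvGood tl.length sl.length (pvInnerAux tl sl i J dp) ∧
    (∀ a b, pvRead (pvInnerAux tl sl i J dp) a b =
      if a = i ∧ b < J then pvDpFun sl tl i b else pvRead dp a b) := by
  intro J
  induction J with
  | zero =>
    intro dp _ hg _ _
    refine ⟨by simpa [pvInnerAux] using hg, ?_⟩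
    intro a b; simp [pvInnerAux]
  | succ J ih =>
    intro dp hJ hg hrows hm
    have hJm : J < sl.length := by omega
    have hcons : (List.range (J+1)).reverse = J :: (List.range J).reverse := by
      rw [List.range_succ, List.reverse_append]; simp
    set v : Bool := ((tl[i]? == sl[J]?) && pvRead dp (i+1) (J+1)) ||
                    (decide (i+2 ≤ tl.length) && pvRead dp (i+2) J) with hv
    set dp' : List (List Bool) := dp.set i ((dp.getD i []).set J v) with hdp'
    have hstep : pvInnerAux tl sl i (J+1) dp = pvInnerAux tl sl i J dp' := by
      unfold pvInnerAux
      rw [hcons, List.foldl_cons]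
    have hiLt : i < dp.length := by rw [hg.1]; omega
    have hjLt : J < (dp.getD i []).length := by rw [hg.2 i (by omega)]; omega
    -- the value written is pvDpFun i J
    have hvF : v = pvDpFun sl tl i J := by
      rw [hv, pvDpFun]
      rw [if_neg (by omega), dif_pos hi]
      rw [hrows (i+1) (J+1) (by omega) (by omega) (by omega)]
      by_cases h2 : i + 2 ≤ tl.length
      · rw [hrows (i+2) J (by omega) (by omega) (by omega)]
      · simp [h2]
    have hread' : ∀ a b, pvRead dp' a b =
        if a = i ∧ b = J then pvDpFun sl tl i J else pvRead dp a b := by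
      intro a b
      rw [hdp', pvRead_setrow _ _ _ _ _ _ hiLt hjLt, hvF]
    have hg' : pvGood tl.length sl.length dp' := pvGood_setrow _ _ _ _ _ _ hg
    obtain ⟨hg2, hr2⟩ := ih dp' (by omega) hg'
      (by intro a b ha hb hbm
          rw [hread', if_neg (by omega)]
          exact hrows a b ha hb hbm)
      (by rw [hread', if_neg (by omega)]; exact hm)
    refine ⟨by rwa [hstep], ?_⟩
    intro a b
    rw [hstep, hr2, hread']
    split_ifs <;> simp_all <;> omega

-- ---- the outer loop finalises rows < I ----

lemma pvOuterAux_spec (tl sl : List Char) :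
    ∀ (I : Nat) (dp : List (List Bool)), I ≤ tl.length →
    pvGood tl.length sl.length dp →
    (∀ a b, I ≤ a → a ≤ tl.length → b ≤ sl.length → pvRead dp a b = pvDpFun sl tl a b) →
    (∀ a, a ≤ tl.length → pvRead dp a sl.length = pvDpFun sl tl a sl.length) →
    ∀ a b, a ≤ tl.length → b ≤ sl.length →
      pvRead (pvOuterAux tl sl I dp) a b = if a < I then pvDpFun sl tl a b else pvRead dp a b := by
  intro I
  induction I with
  | zero => intro dp _ _ _ _ a b _ _; simp [pvOuterAux]
  | succ I ih =>
    intro dp hI hg hrows hcol a b ha hb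
    have hcons : (List.range (I+1)).reverse = I :: (List.range I).reverse := by
      rw [List.range_succ, List.reverse_append]; simp
    have hstep : pvOuterAux tl sl (I+1) dp = pvOuterAux tl sl I (pvInnerAux tl sl I sl.length dp) := by
      unfold pvOuterAux
      rw [hcons, List.foldl_cons]
    obtain ⟨hg', hr'⟩ := pvInnerAux_spec tl sl I (by omega) sl.length dp (le_refl _) hg
      (fun a b hIa hat hbm => hrows a b (by omega) hat hbm)
      (hcol I (by omega))
    have hrows' : ∀ a' b', I ≤ a' → a' ≤ tl.length → b' ≤ sl.length →
        pvRead (pvInnerAux tl sl I sl.length dp) a' b' = pvDpFun sl tl a' b' := by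
      intro a' b' ha' hat' hbm'
      rw [hr']
      by_cases hai : a' = I
      · by_cases hbs : b' < sl.length
        · rw [if_pos ⟨hai, hbs⟩, hai]
        · have hbs' : b' = sl.length := by omega
          rw [if_neg (by omega), hbs', hai]
          exact hcol I (by omega)
      · rw [if_neg (by omega)]
        exact hrows a' b' (by omega) hat' hbm'
    have hcol' : ∀ a', a' ≤ tl.length →
        pvRead (pvInnerAux tl sl I sl.length dp) a' sl.length = pvDpFun sl tl a' sl.length := by
      intro a' hat'
      rw [hr', if_neg (by omega)]
      exact hcol a' hat'
    rw [hstep, ih (pvInnerAux tl sl I sl.length dp) (by omega) hg' hrows' hcol' a b ha hb, hr']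
    by_cases h1 : a < I
    · rw [if_pos h1, if_pos (show a < I + 1 by omega)]
    · rw [if_neg h1]
      by_cases h2 : a = I
      · rw [if_pos (show a < I + 1 by omega)]
        by_cases h3 : b < sl.length
        · rw [if_pos ⟨h2, h3⟩, h2]
        · have hb' : b = sl.length := by omega
          rw [if_neg (show ¬(a = I ∧ b < sl.length) by omega), hb', h2]
          exact hcol I (by omega)
      · rw [if_neg (show ¬(a = I ∧ b < sl.length) by omega), if_neg (show ¬(a < I + 1) by omega)]

-- ---- the initial table satisfies the hypotheses ----

lemma pvDp0_row (tl sl : List Char) (a : Nat) (ha : a < tl.length + 1) :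
    ((List.range (tl.length + 1)).map
        (fun _ => List.replicate (sl.length + 1) (false : Bool))).getD a []
      = List.replicate (sl.length + 1) false := by
  rw [List.getD_eq_getElem?_getD, List.getElem?_map, List.getElem?_range ha]
  rfl

lemma pvDp0_read (tl sl : List Char) (a b : Nat) :
    pvRead ((List.range (tl.length + 1)).map
      (fun _ => List.replicate (sl.length + 1) false)) a b = false := by
  unfold pvRead
  by_cases ha : a < tl.length + 1
  · rw [pvDp0_row tl sl a ha]
    rw [List.getD_eq_getElem?_getD, List.getElem?_replicate]
    split_ifs <;> rfl
  · have h0 : ((List.range (tl.length + 1)).map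
        (fun _ => List.replicate (sl.length + 1) (false : Bool))).getD a [] = [] := by
      rw [List.getD_eq_getElem?_getD, List.getElem?_map]
      rw [List.getElem?_eq_none_iff.mpr (by simpa using ha)]
      rfl
    rw [h0]
    rfl

lemma pvDp0_good (tl sl : List Char) :
    pvGood tl.length sl.length
      ((List.range (tl.length + 1)).map (fun _ => List.replicate (sl.length + 1) false)) := by
  refine ⟨by simp, ?_⟩
  intro a ha
  rw [pvDp0_row tl sl a (by omega)]
  simp

-- ---- A computes pvDpFun 0 0 ----

lemma pvA_eq_dpFun (s t : String) :
    possible_by_bruteforce s t = pvDpFun s.toList t.toList 0 0 := by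
  unfold possible_by_bruteforce
  set tl := t.toList with htl
  set sl := s.toList with hsl
  show pvRead (pvOuterAux tl sl tl.length (pvInitAux tl sl (tl.length + 1)
    ((List.range (tl.length + 1)).map (fun _ => List.replicate (sl.length + 1) false)))) 0 0
    = pvDpFun sl tl 0 0
  set dp0 : List (List Bool) :=
    (List.range (tl.length + 1)).map (fun _ => List.replicate (sl.length + 1) false) with hdp0
  obtain ⟨hg1, hr1⟩ := pvInitAux_spec tl sl (tl.length + 1) dp0 (pvDp0_good tl sl) (le_refl _)
  have hdp1 : ∀ a b, pvRead (pvInitAux tl sl (tl.length + 1) dp0) a b =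
      if a < tl.length + 1 ∧ b = sl.length then decide ((tl.length - a) % 2 = 0) else false := by
    intro a b; rw [hr1 a b, pvDp0_read]
  have hcol : ∀ a, a ≤ tl.length →
      pvRead (pvInitAux tl sl (tl.length + 1) dp0) a sl.length = pvDpFun sl tl a sl.length := by
    intro a ha
    rw [hdp1, pvDpFun]
    rw [if_pos ⟨by omega, rfl⟩, if_pos rfl]
  have hrows : ∀ a b, tl.length ≤ a → a ≤ tl.length → b ≤ sl.length →
      pvRead (pvInitAux tl sl (tl.length + 1) dp0) a b = pvDpFun sl tl a b := by
    intro a b h1 h2 hb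
    have haa : a = tl.length := by omega
    subst haa
    by_cases hbm : b = sl.length
    · subst hbm; exact hcol _ (le_refl _)
    · rw [hdp1, pvDpFun]
      simp [hbm]
  have hmain := pvOuterAux_spec tl sl tl.length (pvInitAux tl sl (tl.length + 1) dp0)
    (le_refl _) hg1 hrows hcol 0 0 (by omega) (by omega)
  rw [hmain]
  split_ifs with hn
  · rfl
  · rw [hdp1, pvDpFun]
    split_ifs <;> simp_all <;> omega

-- ---- B computes pvDpFun 0 0 ----

-- pvDpFun is false once j has passed the end of s
lemma pvDpFun_gt (sl tl : List Char) :
    ∀ i j, sl.length < j → pvDpFun sl tl i j = false := by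
  intro i
  induction hd : tl.length - i using Nat.strong_induction_on generalizing i with
  | _ d ih =>
    intro j hj
    rw [pvDpFun, if_neg (by omega)]
    by_cases hin : i < tl.length
    · rw [dif_pos hin]
      have h1 : sl[j]? = none := by
        rw [List.getElem?_eq_none_iff]; omega
      rw [h1]
      have h2 : (tl[i]? == (none : Option Char)) = false := by
        have : tl[i]? = some tl[i] := List.getElem?_eq_getElem hin
        rw [this]; rfl
      rw [h2]
      by_cases h3 : i + 2 ≤ tl.length
      · rw [ih (tl.length - (i+2)) (by omega) (i+2) rfl j hj]
        simp
      · simp [h3]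
    · rw [dif_neg hin]

-- one pair-deletion in front preserves the DP value
lemma pvDpFun_delete (sl tl : List Char) (i j : Nat) (h2 : i + 2 ≤ tl.length)
    (hd : pvDpFun sl tl (i+2) j = true) : pvDpFun sl tl i j = true := by
  rw [pvDpFun]
  by_cases hj : j = sl.length
  · rw [pvDpFun] at hd
    simp [hj] at hd ⊢
    omega
  · rw [if_neg hj, dif_pos (by omega)]
    simp [h2, hd]

-- any even number of pair-deletions in front preserves the DP value
lemma pvDpFun_mono (sl tl : List Char) (k : Nat) :
    ∀ i j, i + 2 * k ≤ tl.length → pvDpFun sl tl (i + 2 * k) j = true → pvDpFun sl tl i j = true := by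
  induction k with
  | zero => intro i j _ h; simpa using h
  | succ k ih =>
    intro i j hk h
    apply pvDpFun_delete sl tl i j (by omega)
    apply ih (i+2) j (by omega)
    have heq : i + 2 + 2 * k = i + 2 * (k + 1) := by ring
    rw [heq]; exact h

-- a true DP state with s not exhausted contains a first match after an even skip
lemma pvDpFun_first_match (sl tl : List Char) :
    ∀ i j, j < sl.length → pvDpFun sl tl i j = true →
    ∃ k, i + 2 * k < tl.length ∧ (tl[i + 2 * k]? == sl[j]?) = true ∧
      pvDpFun sl tl (i + 2 * k + 1) (j+1) = true := by
  intro i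
  induction hd : tl.length - i using Nat.strong_induction_on generalizing i with
  | _ d ih =>
    intro j hj h
    rw [pvDpFun, if_neg (by omega)] at h
    by_cases hin : i < tl.length
    · rw [dif_pos hin] at h
      rcases Bool.or_eq_true_iff.mp h with hmatch | hdel
      · obtain ⟨hc, hrest⟩ := Bool.and_eq_true_iff.mp hmatch
        exact ⟨0, by simpa using hin, by simpa using hc, by simpa using hrest⟩
      · obtain ⟨hle, hrest⟩ := Bool.and_eq_true_iff.mp hdel
        have hle' : i + 2 ≤ tl.length := by simpa using hle
        obtain ⟨k, hk1, hk2, hk3⟩ := ih (tl.length - (i+2)) (by omega) (i+2) rfl j hj hrest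
        refine ⟨k + 1, by omega, ?_, ?_⟩
        · have heq : i + 2 * (k+1) = i + 2 + 2 * k := by ring
          rw [heq]; exact hk2
        · have heq : i + 2 * (k+1) + 1 = i + 2 + 2 * k + 1 := by ring
          rw [heq]; exact hk3
    · rw [dif_neg hin] at h
      exact absurd h (by simp)

lemma pvGreedy_eq_dpFun (sl tl : List Char) :
    ∀ i j, pvGreedyLoop sl tl i j = pvDpFun sl tl i j := by
  intro i
  induction hd : tl.length - i using Nat.strong_induction_on generalizing i with
  | _ d ih =>
    intro j
    rw [pvGreedyLoop, pvDpFun]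
    by_cases hj : j = sl.length
    · subst hj
      rw [if_neg (show ¬(i < tl.length ∧ sl.length < sl.length) by omega), if_pos rfl]
      simp
    · rw [if_neg hj]
      by_cases hjm : j < sl.length
      · by_cases hin : i < tl.length
        · rw [if_pos ⟨hin, hjm⟩, dif_pos hin]
          by_cases hc : (tl[i]? == sl[j]?) = true
          · rw [if_pos hc, hc, ih (tl.length - (i+1)) (by omega) (i+1) rfl (j+1)]
            simp only [Bool.true_and]
            by_cases hfirst : pvDpFun sl tl (i+1) (j+1) = true
            · simp [hfirst]
            · simp only [Bool.not_eq_true] at hfirst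
              rw [hfirst]
              by_cases hdel : (decide (i + 2 ≤ tl.length) && pvDpFun sl tl (i+2) j) = true
              · exfalso
                obtain ⟨hle, hrest⟩ := Bool.and_eq_true_iff.mp hdel
                have hle' : i + 2 ≤ tl.length := by simpa using hle
                obtain ⟨k, hk1, hk2, hk3⟩ := pvDpFun_first_match sl tl (i+2) j hjm hrest
                have heq : i + 2 + 2 * k + 1 = (i + 1) + 2 * (k + 1) := by ring
                rw [heq] at hk3
                have := pvDpFun_mono sl tl (k+1) (i+1) (j+1) (by omega) hk3
                rw [hfirst] at this
                exact absurd this (by simp)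
              · simp only [Bool.not_eq_true] at hdel
                rw [hdel]
                rfl
          · rw [if_neg hc, ih (tl.length - (i+2)) (by omega) (i+2) rfl j]
            have hc' : (tl[i]? == sl[j]?) = false := by
              cases h : (tl[i]? == sl[j]?) <;> simp_all
            rw [hc']
            simp only [Bool.false_and, Bool.false_or]
            by_cases h3 : i + 2 ≤ tl.length
            · simp [h3]
            · have : pvDpFun sl tl (i+2) j = false := by
                rw [pvDpFun, if_neg hj, dif_neg (by omega)]
              rw [this]
              simp
        · rw [if_neg (by omega), dif_neg hin]
          simp [hj]
      · have hjg : sl.length < j := by omega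
        rw [if_neg (by omega)]
        by_cases hin : i < tl.length
        · rw [dif_pos hin]
          have h1 : sl[j]? = none := by rw [List.getElem?_eq_none_iff]; omega
          have h2 : tl[i]? = some tl[i] := List.getElem?_eq_getElem hin
          rw [h1, h2, pvDpFun_gt sl tl (i+2) j hjg]
          simp [hj]
        · rw [dif_neg hin]
          simp [hj]

-- ===== VERDICT (by name: the statement is the Claim_ definition above) =====
theorem possible_by_bruteforce_spec : Claim_equal_possible_by_bruteforce := by
  intro s t _
  unfold Spec_possible_by_bruteforce possible_by_bruteforce_alt
  rw [pvA_eq_dpFun, pvGreedy_eq_dpFun]
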